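-- pv_equiv track=rewrite | github.com/KkonepHuk/Stack-calculator | roman_to_arabic_module.py | expression_to_arabic
-- ===== SOURCE A (Python) =====
-- def roman_to_int(s):
--         res = 0
--         dictionary = {'I':1, 'V':5, 'X':10, 'L':50, 'C':100, 'D':500, 'M':1000}
--         for i in range(1, len(s)):
--             if dictionary[s[i - 1]] < dictionary[s[i]]:
--                 res -= dictionary[s[i - 1]]
--             else:
--                 res += dictionary[s[i - 1]]
--         res += dictionary[s[-1]]
--         return res
--
-- def expression_to_arabic(string):
--     string+= ' '
--     roman = 'IVXLCDM'
--     to_int = ''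
--     result = ''
--     for i in range(len(string)):
--         if string[i] in roman and string[i + 1] in roman:
--             to_int += string[i]
--         elif string[i] in roman and not(string[i + 1] in roman):
--             to_int += string[i]
--             new_int = roman_to_int(to_int)
--             result += str(new_int)
--             to_int = ''
--         else:
--             result += string[i]
--
--     return result[:-1]
-- ===== SOURCE B (Python) =====
-- import re
--
--
-- def roman_to_int(s):
--         res = 0
--         dictionary = {'I':1, 'V':5, 'X':10, 'L':50, 'C':100, 'D':500, 'M':1000}
--         for i in range(1, len(s)):
--             if dictionary[s[i - 1]] < dictionary[s[i]]:
--                 res -= dictionary[s[i - 1]]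
--             else:
--                 res += dictionary[s[i - 1]]
--         res += dictionary[s[-1]]
--         return res
--
--
-- def expression_to_arabic(string):
--     return re.sub(r'[IVXLCDM]+', lambda m: str(roman_to_int(m.group())), string)
-- ===== Notes on version B (the rewrite author's own statement) =====
-- stated objective: idiomatic
-- what changed: Replaces A's space-sentinel plus per-character index loop with lookahead and manual run-flushing by a single re.sub over maximal [IVXLCDM]+ runs, converting each matched run with the unchanged roman_to_int helper.
import Mathlib
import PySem

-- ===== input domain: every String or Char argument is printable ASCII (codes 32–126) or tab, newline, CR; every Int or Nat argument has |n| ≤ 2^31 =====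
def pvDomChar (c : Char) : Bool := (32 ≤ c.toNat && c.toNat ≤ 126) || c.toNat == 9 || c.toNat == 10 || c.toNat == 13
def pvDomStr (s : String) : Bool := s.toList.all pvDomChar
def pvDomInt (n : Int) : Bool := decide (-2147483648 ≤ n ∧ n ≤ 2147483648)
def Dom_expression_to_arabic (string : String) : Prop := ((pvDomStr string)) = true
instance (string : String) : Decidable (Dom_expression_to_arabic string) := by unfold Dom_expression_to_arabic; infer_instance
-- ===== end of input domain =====

-- B replaces A's space-sentinel index loop with lookahead by a regex-style substitution of
-- maximal roman runs (idiomatic, re.sub in Python); same O(n) cost, return values proved equal.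

-- ===== PORT A =====
-- shared helper roman_to_int (identical function in Source A and Source B).
-- dictionary[c] is looked up with default 0: both programs only ever call it on
-- characters from 'IVXLCDM', where the key is always present (no KeyError reachable).
def pvRomanDict : PySem.Dict Char Int :=
  PySem.Dict.ofList [('I',1), ('V',5), ('X',10), ('L',50), ('C',100), ('D',500), ('M',1000)]

def roman_to_int (s : String) : Int :=
  let cs := s.toList
  let res := (PySem.List.pyRange 1 cs.length 1).foldl
    (fun res i =>
      let prev := pvRomanDict.getD ((PySem.List.pyGet? cs (i - 1)).getD ' ') 0
      let cur  := pvRomanDict.getD ((PySem.List.pyGet? cs i).getD ' ') 0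
      if prev < cur then res - prev else res + prev) 0
  res + pvRomanDict.getD ((PySem.List.pyGet? cs (-1)).getD ' ') 0

-- the body of A's for-loop (state = (to_int, result) as character lists).
-- string[i+1] is read only when string[i] is roman (Python's `and` short-circuits);
-- there the index is in range, so the non-roman default ' ' of getD is never the
-- deciding value on the branch Python actually takes.
def pvStepA (cs : List Char) (acc : List Char × List Char) (i : Int) : List Char × List Char :=
  let roman := "IVXLCDM".toList
  let ci := (PySem.List.pyGet? cs i).getD ' '
  let cn := (PySem.List.pyGet? cs (i + 1)).getD ' '
  if roman.contains ci && roman.contains cn then (acc.1 ++ [ci], acc.2)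
  else if roman.contains ci then
    ([], acc.2 ++ PySem.Int.toChars (roman_to_int (String.ofList (acc.1 ++ [ci]))))
  else (acc.1, acc.2 ++ [ci])

def expression_to_arabic (string : String) : String :=
  -- string += ' '; loop for i in range(len(string)) with body pvStepA; return result[:-1]
  String.ofList (PySem.List.slice
    (((PySem.List.pyRange 0 ((string.toList ++ [' ']).length) 1).foldl
        (pvStepA (string.toList ++ [' '])) ([], [])).2)
    none (some (-1)))

-- ===== PORT B =====
def pvIsRoman (c : Char) : Bool := "IVXLCDM".toList.contains c

-- hand port of re.sub(r'[IVXLCDM]+', lambda m: str(roman_to_int(m.group())), string):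
-- exact — re.sub scans left to right, replacing each maximal non-empty run of roman
-- letters by the replacement string and copying every other character through.
def pvSub : List Char → List Char
  | [] => []
  | c :: rest =>
    if pvIsRoman c then
      PySem.Int.toChars (roman_to_int (String.ofList (c :: rest.takeWhile pvIsRoman)))
        ++ pvSub (rest.dropWhile pvIsRoman)
    else c :: pvSub rest
termination_by cs => cs.length
decreasing_by
  · simpa using Nat.lt_succ_of_le (List.length_dropWhile_le pvIsRoman rest)
  · simp

def expression_to_arabic_alt (string : String) : String :=
  String.ofList (pvSub string.toList)

-- ===== PRECONDITION & SPEC =====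
def Spec_expression_to_arabic (string : String) (out : String) : Prop := out = expression_to_arabic_alt string
instance (string : String) (out : String) : Decidable (Spec_expression_to_arabic string out) := by unfold Spec_expression_to_arabic; infer_instance

-- ===== CLAIM (what is proved, stated in full; the proofs are below) =====
def Claim_equal_expression_to_arabic : Prop := ∀ (string : String), Dom_expression_to_arabic string → Spec_expression_to_arabic string (expression_to_arabic string)

-- ===== LEMMAS AND PROOFS =====

-- A's loop as a structural recursion on the remaining suffix of cs.
def pvLoopA (p res : List Char) : List Char → List Char × List Char
  | [] => (p, res)
  | c :: rest =>
    if pvIsRoman c && pvIsRoman (rest.head?.getD ' ') then pvLoopA (p ++ [c]) res rest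
    else if pvIsRoman c then
      pvLoopA [] (res ++ PySem.Int.toChars (roman_to_int (String.ofList (p ++ [c])))) rest
    else pvLoopA p (res ++ [c]) rest

-- the emitted output of A's loop, without the result accumulator.
def pvEmit (p : List Char) : List Char → List Char
  | [] => []
  | c :: rest =>
    if pvIsRoman c && pvIsRoman (rest.head?.getD ' ') then pvEmit (p ++ [c]) rest
    else if pvIsRoman c then
      PySem.Int.toChars (roman_to_int (String.ofList (p ++ [c]))) ++ pvEmit [] rest
    else c :: pvEmit p rest

lemma pvFold_eq (cs : List Char) :
    ∀ (suf : List Char) (k : Nat) (p res : List Char),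
      cs.drop k = suf → k ≤ cs.length →
      (PySem.List.pyRange (k : Int) (cs.length : Int) 1).foldl (pvStepA cs) (p, res)
        = pvLoopA p res suf := by
  intro suf
  induction suf with
  | nil =>
    intro k p res hdrop hk
    have hlen : cs.length ≤ k := by
      simpa using (List.drop_eq_nil_iff).1 hdrop
    rw [PySem.List.pyRange_one_eq_nil (by exact_mod_cast hlen)]
    simp [pvLoopA]
  | cons c rest ih =>
    intro k p res hdrop hk
    have hklt : k < cs.length := by
      by_contra h
      have : cs.drop k = [] := List.drop_eq_nil_iff.2 (by omega)
      simp [this] at hdrop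
    have hck : cs[k]? = some c := by
      have : (cs.drop k)[0]? = some c := by simp [hdrop]
      simpa [List.getElem?_drop] using this
    have hck1 : cs[k + 1]? = rest.head? := by
      have : (cs.drop k)[1]? = rest.head? := by
        simp [hdrop, List.head?_eq_getElem?]
      simpa [List.getElem?_drop] using this
    have hdrop1 : cs.drop (k + 1) = rest := by
      have : cs.drop (k + 1) = (cs.drop k).drop 1 := by
        rw [List.drop_drop]
      simp [this, hdrop]
    rw [PySem.List.pyRange_one_cons (by exact_mod_cast hklt)]
    rw [List.foldl_cons]
    have hcast : ((k : Int) + 1) = ((k + 1 : Nat) : Int) := by push_cast; ring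
    rw [hcast]
    rw [ih (k + 1) _ _ hdrop1 (by omega)]
    -- now reduce the step to the matching pvLoopA branch
    have hstep : pvStepA cs (p, res) (k : Int) =
        (if pvIsRoman c && pvIsRoman (rest.head?.getD ' ') then (p ++ [c], res)
         else if pvIsRoman c then
           ([], res ++ PySem.Int.toChars (roman_to_int (String.ofList (p ++ [c]))))
         else (p, res ++ [c])) := by
      simp only [pvStepA, PySem.List.pyGet?_natCast, hcast, hck, hck1, Option.getD_some]
      cases rest with
      | nil => simp [pvIsRoman]
      | cons d ds => simp [pvIsRoman]
    rw [hstep]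
    by_cases hb1 : pvIsRoman c = true <;> by_cases hb2 : pvIsRoman (rest.head?.getD ' ') = true <;>
      simp [pvLoopA, hb1, hb2]

lemma pvLoopA_snd (cs : List Char) :
    ∀ (p res : List Char), (pvLoopA p res cs).2 = res ++ pvEmit p cs := by
  induction cs with
  | nil => intro p res; simp [pvLoopA, pvEmit]
  | cons c rest ih =>
    intro p res
    by_cases hb1 : pvIsRoman c = true <;> by_cases hb2 : pvIsRoman (rest.head?.getD ' ') = true <;>
      simp [pvLoopA, pvEmit, hb1, hb2, ih]

lemma pvIsRoman_space : pvIsRoman ' ' = false := by decide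

lemma pvEmit_run :
    ∀ (ys : List Char), ys ≠ [] → (∀ c ∈ ys, pvIsRoman c = true) →
      ∀ (p zs : List Char), pvIsRoman ((zs ++ [' ']).headD ' ') = false →
        pvEmit p (ys ++ (zs ++ [' ']))
          = PySem.Int.toChars (roman_to_int (String.ofList (p ++ ys)))
              ++ pvEmit [] (zs ++ [' ']) := by
  intro ys
  induction ys with
  | nil => intro h; exact absurd rfl h
  | cons y ys ih =>
    intro _ hall p zs hz
    have hy : pvIsRoman y = true := hall y (by simp)
    cases ys with
    | nil =>
      have hhead : (zs ++ [' ']).headD ' ' = ((zs ++ [' ']).headD ' ') := rfl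
      cases zs with
      | nil => simp [pvEmit, hy, pvIsRoman_space]
      | cons z zs' =>
        have hz' : pvIsRoman z = false := by simpa using hz
        simp [pvEmit, hy, hz']
    | cons y' ys' =>
      have hy' : pvIsRoman y' = true := hall y' (by simp)
      have : pvEmit p ((y :: y' :: ys') ++ (zs ++ [' ']))
          = pvEmit (p ++ [y]) ((y' :: ys') ++ (zs ++ [' '])) := by
        simp [pvEmit, hy, hy']
      rw [this, ih (by simp) (fun c hc => hall c (by simp [hc])) (p ++ [y]) zs hz]
      simp

lemma pvEmit_eq_pvSub : ∀ (n : Nat) (s : List Char), s.length ≤ n →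
    pvEmit [] (s ++ [' ']) = pvSub s ++ [' '] := by
  intro n
  induction n with
  | zero =>
    intro s hs
    have : s = [] := List.eq_nil_of_length_eq_zero (by omega)
    subst this
    simp [pvEmit, pvSub, pvIsRoman_space]
  | succ n ih =>
    intro s hs
    cases s with
    | nil => simp [pvEmit, pvSub, pvIsRoman_space]
    | cons c rest =>
      by_cases hc : pvIsRoman c
      · -- maximal run c :: takeWhile, remainder dropWhile
        have hsplit : rest = rest.takeWhile pvIsRoman ++ rest.dropWhile pvIsRoman :=
          (List.takeWhile_append_dropWhile).symm
        have hall : ∀ x ∈ c :: rest.takeWhile pvIsRoman, pvIsRoman x = true := by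
          intro x hx
          rcases List.mem_cons.1 hx with h | h
          · simpa [h] using hc
          · exact List.mem_takeWhile_imp h
        have hhead : pvIsRoman ((rest.dropWhile pvIsRoman ++ [' ']).headD ' ') = false := by
          cases hdw : rest.dropWhile pvIsRoman with
          | nil => simp [pvIsRoman_space]
          | cons z zs =>
            have := List.head?_dropWhile_not pvIsRoman rest
            rw [hdw] at this
            simpa using this
        have hlen : (rest.dropWhile pvIsRoman).length ≤ n := by
          have h1 : (rest.dropWhile pvIsRoman).length ≤ rest.length :=
            List.length_dropWhile_le _ _
          simp at hs; omega
        have hre : (c :: rest) ++ [' ']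
            = (c :: rest.takeWhile pvIsRoman) ++ (rest.dropWhile pvIsRoman ++ [' ']) := by
          conv_lhs => rw [hsplit]
          simp only [List.cons_append, List.append_assoc]
        rw [hre,
          pvEmit_run (c :: rest.takeWhile pvIsRoman) (by simp) hall [] _ hhead,
          ih _ hlen]
        simp [pvSub, hc]
      · have hlen : rest.length ≤ n := by simp at hs; omega
        simp [pvEmit, pvSub, hc, ih rest hlen]

-- ===== VERDICT (by name: the statement is the Claim_ definition above) =====
theorem expression_to_arabic_spec : Claim_equal_expression_to_arabic := by
  intro s _
  unfold Spec_expression_to_arabic expression_to_arabic expression_to_arabic_alt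
  have hfold := pvFold_eq (s.toList ++ [' ']) (s.toList ++ [' ']) 0 [] [] (by simp) (by simp)
  simp only [Nat.cast_zero] at hfold
  rw [hfold, PySem.List.slice_to_neg_one]
  rw [pvLoopA_snd, pvEmit_eq_pvSub (s.toList).length s.toList le_rfl]
  simp
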